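-- pv_equiv track=rewrite | github.com/maniczko/kindleMaster | text_normalization.py | _trim_link_token
-- ===== SOURCE A (Python) =====
-- def _trim_link_token(token: str) -> str:
--     trimmed = (token or "").strip().strip("<>\"'")
--     while trimmed and trimmed[-1] in ".,;:!?":
--         trimmed = trimmed[:-1]
--     for closing, opening in ((")", "("), ("]", "["), ("}", "{")):
--         while trimmed.endswith(closing) and trimmed.count(closing) > trimmed.count(opening):
--             trimmed = trimmed[:-1]
--     return trimmed
-- ===== SOURCE B (Python) =====
-- def _trim_link_token(token: str) -> str:
--     trimmed = (token or "").strip().strip("<>\"'")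
--     trimmed = trimmed.rstrip(".,;:!?")
--     for closing, opening in ((")", "("), ("]", "["), ("}", "{")):
--         excess = trimmed.count(closing) - trimmed.count(opening)
--         if excess > 0:
--             run = len(trimmed) - len(trimmed.rstrip(closing))
--             k = min(excess, run)
--             if k:
--                 trimmed = trimmed[:-k]
--     return trimmed
-- ===== Notes on version B (the rewrite author's own statement) =====
-- stated objective: alternative
-- what changed: Replaces A's three character-at-a-time while-loops (each iteration recounting both brackets over the whole string) and the punctuation-peeling loop by rstrip plus, per bracket pair, one arithmetic step slicing off min(excess closers, trailing run) at once.
import Mathlib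
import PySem

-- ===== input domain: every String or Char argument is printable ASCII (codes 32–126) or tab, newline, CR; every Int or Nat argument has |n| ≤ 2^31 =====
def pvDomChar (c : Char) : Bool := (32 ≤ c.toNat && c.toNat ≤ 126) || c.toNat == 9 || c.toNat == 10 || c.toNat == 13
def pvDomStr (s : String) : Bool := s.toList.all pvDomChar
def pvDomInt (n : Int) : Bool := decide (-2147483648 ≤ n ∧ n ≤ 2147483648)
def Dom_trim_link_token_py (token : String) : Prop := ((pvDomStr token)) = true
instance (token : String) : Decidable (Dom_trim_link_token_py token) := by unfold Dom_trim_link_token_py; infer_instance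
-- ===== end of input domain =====

-- B replaces A's character-at-a-time peeling while-loops (which recount brackets each
-- iteration) by rstrip and, per bracket pair, one computed slice of min(excess, trailing run).

-- ===== PORT A =====
-- the punctuation string ".,;:!?" as a char list; 'trimmed[-1] in ".,;:!?"' is membership here
def pvPunctA : List Char := ".,;:!?".toList

-- 'while trimmed and trimmed[-1] in ".,;:!?": trimmed = trimmed[:-1]'
-- (condition phrased on getLast?: 'trimmed and trimmed[-1] ∈ …' ↔ the last char exists and is punctuation)
def pvWhilePunctA (cs : List Char) : List Char :=
  if h : cs.getLast? ∈ pvPunctA.map some then pvWhilePunctA cs.dropLast else cs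
termination_by cs.length
decreasing_by
  have hne : cs ≠ [] := by intro hnil; subst hnil; simp at h
  have := List.length_pos_iff.mpr hne
  simp [List.length_dropLast]; omega

-- 'while trimmed.endswith(closing) and trimmed.count(closing) > trimmed.count(opening):
--    trimmed = trimmed[:-1]'   (endswith/count of a 1-char string: last element / char count — exact)
def pvWhileBrA (closing opening : Char) (cs : List Char) : List Char :=
  if h : cs.getLast? = some closing ∧ cs.count opening < cs.count closing
  then pvWhileBrA closing opening cs.dropLast
  else cs
termination_by cs.length
decreasing_by
  have hne : cs ≠ [] := by intro hnil; subst hnil; simp at h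
  have := List.length_pos_iff.mpr hne
  simp [List.length_dropLast]; omega

-- '(token or "")' ≡ token: "" is the only falsy str and "".strip() = ""
def trim_link_token_py (token : String) : String :=
  let trimmed := PySem.Str.stripChars (PySem.Str.strip token) "<>\"'"
  let cs := pvWhilePunctA trimmed.toList
  let cs := pvWhileBrA ')' '(' cs
  let cs := pvWhileBrA ']' '[' cs
  let cs := pvWhileBrA '}' '{' cs
  String.ofList cs

-- ===== PORT B =====
-- hand port of Python's str.rstrip(chars) (PySem has only two-sided stripChars): exact —
-- removes the maximal trailing block of characters from 'chars'
def pvRstripChars (chars cs : List Char) : List Char :=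
  (cs.reverse.dropWhile (chars.contains ·)).reverse

-- one bracket pair of B: excess = count(closing) - count(opening); run = length of the
-- trailing run of 'closing'; slice off min(excess, run) closers in one step
def pvTrimBrB (closing opening : Char) (cs : List Char) : List Char :=
  let excess : Int := (cs.count closing : Int) - (cs.count opening : Int)
  if 0 < excess then
    let run : Int := (cs.length : Int) - ((pvRstripChars [closing] cs).length : Int)
    let k := min excess run
    if k ≠ 0 then PySem.List.slice cs none (some (-k)) else cs
  else cs

def trim_link_token_py_alt (token : String) : String :=
  let trimmed := PySem.Str.stripChars (PySem.Str.strip token) "<>\"'"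
  let cs := pvRstripChars ".,;:!?".toList trimmed.toList
  let cs := pvTrimBrB ')' '(' cs
  let cs := pvTrimBrB ']' '[' cs
  let cs := pvTrimBrB '}' '{' cs
  String.ofList cs

-- ===== PRECONDITION & SPEC =====
def Spec_trim_link_token_py (token : String) (out : String) : Prop := out = trim_link_token_py_alt token
instance (token : String) (out : String) : Decidable (Spec_trim_link_token_py token out) := by unfold Spec_trim_link_token_py; infer_instance

-- ===== CLAIM (what is proved, stated in full; the proofs are below) =====
def Claim_equal_trim_link_token_py : Prop := ∀ (token : String), Dom_trim_link_token_py token → Spec_trim_link_token_py token (trim_link_token_py token)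

-- ===== LEMMAS AND PROOFS =====

-- length of the trailing run of c, and the (truncated) closer excess
def pvRun (c : Char) (cs : List Char) : Nat := (cs.reverse.takeWhile (fun x => [c].contains x)).length
def pvK (c o : Char) (cs : List Char) : Nat := min (pvRun c cs) (cs.count c - cs.count o)

theorem punct_rev (rs : List Char) :
    pvWhilePunctA rs.reverse = (rs.dropWhile (pvPunctA.contains ·)).reverse := by
  induction rs with
  | nil => simp [pvWhilePunctA]
  | cons x t ih =>
    rw [pvWhilePunctA]
    by_cases hx : x ∈ pvPunctA
    · simp [hx, ih]
    · simp [hx]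

theorem punct_eq (cs : List Char) : pvWhilePunctA cs = pvRstripChars pvPunctA cs := by
  have := punct_rev cs.reverse
  simpa [pvRstripChars] using this

theorem len_rstrip (c : Char) (cs : List Char) :
    (pvRstripChars [c] cs).length = cs.length - pvRun c cs := by
  have h := congrArg List.length
    (List.takeWhile_append_dropWhile (p := fun x => ([c].contains x)) (l := cs.reverse))
  simp only [List.length_append, List.length_reverse] at h
  simp only [pvRstripChars, pvRun, List.length_reverse]
  omega

theorem run_le (c : Char) (cs : List Char) : pvRun c cs ≤ cs.length := by
  have := List.Sublist.length_le
    (List.takeWhile_sublist (l := cs.reverse) (p := fun x => [c].contains x))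
  simpa [pvRun] using this

theorem run_pos_last (c : Char) (cs : List Char) (h : 0 < pvRun c cs) :
    cs.getLast? = some c := by
  unfold pvRun at h
  rcases hr : cs.reverse with _ | ⟨x, t⟩
  · simp [hr] at h
  · rw [hr, List.takeWhile_cons] at h
    by_cases hx : x = c
    · rw [← List.head?_reverse, hr]; simp [hx]
    · simp [hx] at h

theorem brB_closed (c o : Char) (cs : List Char) :
    pvTrimBrB c o cs = cs.take (cs.length - pvK c o cs) := by
  unfold pvTrimBrB
  by_cases hx : (0 : Int) < (cs.count c : Int) - (cs.count o : Int)
  · have hlt : cs.count o < cs.count c := by omega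
    have hrun := len_rstrip c cs
    have hle := run_le c cs
    simp only [hx, if_true]
    have hruncast : ((cs.length : Int) - ((pvRstripChars [c] cs).length : Int)) = (pvRun c cs : Int) := by
      rw [hrun]; omega
    rw [hruncast]
    have hk : min ((cs.count c : Int) - (cs.count o : Int)) (pvRun c cs : Int) = (pvK c o cs : Int) := by
      unfold pvK; omega
    rw [hk]
    by_cases hz : (pvK c o cs : Int) ≠ 0
    · have hpos : 0 < pvK c o cs := by omega
      rw [if_pos hz, PySem.List.slice_to_neg_natCast cs (pvK c o cs) hpos]
    · rw [if_neg hz]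
      have : pvK c o cs = 0 := by omega
      rw [this]; simp
  · simp only [hx, if_false]
    have : pvK c o cs = 0 := by unfold pvK; omega
    rw [this]; simp

theorem brA_closed (c o : Char) (h : o ≠ c) (cs : List Char) :
    pvWhileBrA c o cs = cs.take (cs.length - pvK c o cs) := by
  induction hn : cs.length using Nat.strong_induction_on generalizing cs with
  | _ n ih =>
  subst hn
  rw [pvWhileBrA]
  by_cases hc : cs.getLast? = some c ∧ cs.count o < cs.count c
  · obtain ⟨hlast, hlt⟩ := hc
    obtain ⟨ys, rfl⟩ := List.getLast?_eq_some_iff.mp hlast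
    rw [dif_pos ⟨hlast, hlt⟩, List.dropLast_concat]
    have hcounts : (ys ++ [c]).count c = ys.count c + 1 := by simp
    have hcounts' : (ys ++ [c]).count o = ys.count o := by
      simp [List.count_singleton]
      exact fun hco => h hco.symm
    have hrun : pvRun c (ys ++ [c]) = pvRun c ys + 1 := by
      unfold pvRun
      simp
    have hK : pvK c o (ys ++ [c]) = pvK c o ys + 1 := by
      unfold pvK
      rw [hcounts, hcounts', hrun]
      rw [hcounts, hcounts'] at hlt
      omega
    have hlen : (ys ++ [c]).length = ys.length + 1 := by simp
    have hKle : pvK c o ys ≤ ys.length := le_trans (min_le_left _ _) (run_le c ys)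
    have htake : (ys ++ [c]).take ((ys ++ [c]).length - pvK c o (ys ++ [c]))
        = ys.take (ys.length - pvK c o ys) := by
      rw [hK, hlen, show ys.length + 1 - (pvK c o ys + 1) = ys.length - pvK c o ys by omega]
      exact List.take_append_of_le_length (by omega)
    rw [htake]
    exact ih ys.length (by simp) ys rfl
  · rw [dif_neg hc]
    have hK : pvK c o cs = 0 := by
      by_cases hlt : cs.count o < cs.count c
      · by_cases hrun : 0 < pvRun c cs
        · exact absurd ⟨run_pos_last c cs hrun, hlt⟩ hc
        · unfold pvK; omega
      · unfold pvK; omega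
    rw [hK]; simp

theorem br_eq (c o : Char) (h : o ≠ c) (cs : List Char) :
    pvTrimBrB c o cs = pvWhileBrA c o cs := by
  rw [brB_closed, brA_closed c o h]

-- ===== VERDICT (by name: the statement is the Claim_ definition above) =====
theorem trim_link_token_py_spec : Claim_equal_trim_link_token_py := by
  intro token _
  unfold Spec_trim_link_token_py
  simp only [trim_link_token_py, trim_link_token_py_alt, punct_eq, pvPunctA,
    ← br_eq ')' '(' (by decide), ← br_eq ']' '[' (by decide), ← br_eq '}' '{' (by decide)]
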